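-- pv_equiv track=rewrite | github.com/kremobil/PracticalPython | coin.py | count_6_streaks
-- ===== SOURCE A (Python) =====
-- def count_6_streaks(throws):
--     streak = 0
--     values = [0, 0]
--     for index in range(len(throws)-1):
--         if throws[index] == throws[index + 1]:
--             streak += 1
--         else:
--             streak = 0
--         if streak >= 6 and throws[index] == "O":
--             values[0] += 1
--         elif streak >= 6 and throws[index] == "R":
--             values[1] += 1
--     return values
-- ===== SOURCE B (Python) =====
-- def count_6_streaks(throws):
--     # Run-length pass: each maximal run of length L contributes max(0, L - 6)
--     # to the counter of its side ('O' or 'R'); other values contribute nothing.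
--     values = [0, 0]
--     i, n = 0, len(throws)
--     while i < n:
--         j = i + 1
--         while j < n and throws[j] == throws[i]:
--             j += 1
--         add = max(0, (j - i) - 6)
--         if throws[i] == "O":
--             values[0] += add
--         elif throws[i] == "R":
--             values[1] += add
--         i = j
--     return values
-- ===== Notes on version B (the rewrite author's own statement) =====
-- stated objective: alternative
-- what changed: Replaces the per-adjacent-pair streak counter with a run-length scan: each maximal run of length L contributes the closed form max(0, L-6) to its side's counter.
import Mathlib
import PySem

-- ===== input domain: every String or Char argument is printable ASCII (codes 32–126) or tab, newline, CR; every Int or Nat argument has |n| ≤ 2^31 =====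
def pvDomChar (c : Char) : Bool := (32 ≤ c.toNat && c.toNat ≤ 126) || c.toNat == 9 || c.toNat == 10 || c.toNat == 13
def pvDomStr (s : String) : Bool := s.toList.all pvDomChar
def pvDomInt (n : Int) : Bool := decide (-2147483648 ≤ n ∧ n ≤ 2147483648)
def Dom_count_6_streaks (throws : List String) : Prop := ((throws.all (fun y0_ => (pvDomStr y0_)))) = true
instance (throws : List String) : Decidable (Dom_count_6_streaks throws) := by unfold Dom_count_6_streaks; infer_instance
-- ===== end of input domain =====

-- B replaces A's per-adjacent-pair streak counter with a run-length scan adding max(0, L-6) per run (alternative decomposition, same cost).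

-- ===== PORT A =====
def count_6_streaks (throws : List String) : List Int :=
  let st := (PySem.List.pyRange 0 ((throws.length : Int) - 1) 1).foldl
    (fun (st : Int × Int × Int) index =>
      let streak := if PySem.List.pyGetD throws index "" = PySem.List.pyGetD throws (index + 1) ""
                    then st.1 + 1 else 0
      if streak ≥ 6 ∧ PySem.List.pyGetD throws index "" = "O" then (streak, st.2.1 + 1, st.2.2)
      else if streak ≥ 6 ∧ PySem.List.pyGetD throws index "" = "R" then (streak, st.2.1, st.2.2 + 1)
      else (streak, st.2.1, st.2.2))
    ((0 : Int), (0 : Int), (0 : Int))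
  [st.2.1, st.2.2]

-- ===== PORT B =====
-- length of the initial segment of the list equal to c (B's inner while loop)
def runLenB (c : String) : List String → Nat
  | [] => 0
  | a :: r => if a = c then runLenB c r + 1 else 0

-- B's outer while loop: one step per maximal run
def goB : List String → Int × Int
  | [] => (0, 0)
  | a :: rest =>
    let k := runLenB a rest
    let w := goB (rest.drop k)
    let add : Int := max 0 ((k : Int) + 1 - 6)
    if a = "O" then (w.1 + add, w.2)
    else if a = "R" then (w.1, w.2 + add)
    else w
termination_by l => l.length
decreasing_by
  simp only [List.length_cons, List.length_drop]
  omega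

def count_6_streaks_alt (throws : List String) : List Int :=
  let w := goB throws
  [w.1, w.2]

-- ===== PRECONDITION & SPEC =====
def Spec_count_6_streaks (throws : List String) (out : List Int) : Prop := out = count_6_streaks_alt throws
instance (throws : List String) (out : List Int) : Decidable (Spec_count_6_streaks throws out) := by unfold Spec_count_6_streaks; infer_instance

-- ===== CLAIM (what is proved, stated in full; the proofs are below) =====
def Claim_equal_count_6_streaks : Prop := ∀ (throws : List String), Dom_count_6_streaks throws → Spec_count_6_streaks throws (count_6_streaks throws)

-- ===== LEMMAS AND PROOFS =====

-- A's loop body, on an explicit pair of adjacent elements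
def stepA (st : Int × Int × Int) (p : String × String) : Int × Int × Int :=
  let streak := if p.1 = p.2 then st.1 + 1 else 0
  if streak ≥ 6 ∧ p.1 = "O" then (streak, st.2.1 + 1, st.2.2)
  else if streak ≥ 6 ∧ p.1 = "R" then (streak, st.2.1, st.2.2 + 1)
  else (streak, st.2.1, st.2.2)

-- number of streak values in (k, k+L] that are ≥ 6
def cnt (k L : Int) : Int := max 0 (k + L - 5) - max 0 (k - 5)

-- A's fold over range(len-1) with xs[i], xs[i+1] is a fold over adjacent pairs
lemma foldl_idx_pairs {α σ : Type} (f : σ → α → α → σ) (xs : List α) (d : α) :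
    ∀ (m a : Nat) (init : σ), xs.length - a ≤ m →
    (PySem.List.pyRange (a : Int) ((xs.length : Int) - 1) 1).foldl
        (fun s i => f s (PySem.List.pyGetD xs i d) (PySem.List.pyGetD xs (i + 1) d)) init
      = ((xs.drop a).zip (xs.drop (a + 1))).foldl (fun s p => f s p.1 p.2) init := by
  intro m
  induction m with
  | zero =>
    intro a init h
    have ha : xs.length ≤ a := by omega
    rw [PySem.List.pyRange_one_eq_nil (by push_cast; omega)]
    rw [List.drop_eq_nil_of_le ha]
    simp
  | succ m ih =>
    intro a init h
    by_cases hlt : a + 1 < xs.length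
    · have h1 : a < xs.length := by omega
      have h2 : a + 1 < xs.length := hlt
      rw [PySem.List.pyRange_one_cons (by push_cast; omega)]
      rw [List.drop_eq_getElem_cons h1, List.drop_eq_getElem_cons h2]
      simp only [List.zip_cons_cons, List.foldl_cons]
      have e1 : PySem.List.pyGetD xs (a : Int) d = xs[a] := by
        rw [PySem.List.pyGetD_natCast]; exact List.getD_eq_getElem xs d h1
      have e2 : PySem.List.pyGetD xs ((a : Int) + 1) d = xs[a + 1] := by
        have : ((a : Int) + 1) = ((a + 1 : Nat) : Int) := by push_cast; ring
        rw [this, PySem.List.pyGetD_natCast]; exact List.getD_eq_getElem xs d h2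
      rw [e1, e2]
      have : ((a : Int) + 1) = ((a + 1 : Nat) : Int) := by push_cast; ring
      rw [this, ih (a + 1) _ (by omega), ← List.drop_eq_getElem_cons h2]
    · rw [PySem.List.pyRange_one_eq_nil (by push_cast; omega)]
      rw [List.drop_eq_nil_of_le (show xs.length ≤ a + 1 by omega)]
      simp

-- goB's defining equation, with its increment written as cnt 0 (runLenB a xs)
lemma goB_cons (a : String) (xs : List String) :
    goB (a :: xs) =
      (let w := goB (xs.drop (runLenB a xs))
       if a = "O" then (w.1 + cnt 0 (runLenB a xs), w.2)
       else if a = "R" then (w.1, w.2 + cnt 0 (runLenB a xs))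
       else w) := by
  rw [goB]
  have : max 0 (((runLenB a xs : Int)) + 1 - 6) = cnt 0 (runLenB a xs) := by
    unfold cnt; omega
  simp only [this]

-- main invariant: the pair-fold from any state equals B's per-run closed form
lemma main_inv (xs : List String) : ∀ (a : String) (k v0 v1 : Int),
    ((((a :: xs).zip xs).foldl stepA (k, v0, v1)).2 : Int × Int) =
      (let L := runLenB a xs
       let w := goB (xs.drop L)
       if a = "O" then (v0 + cnt k L + w.1, v1 + w.2)
       else if a = "R" then (v0 + w.1, v1 + cnt k L + w.2)
       else (v0 + w.1, v1 + w.2)) := by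
  induction xs with
  | nil =>
    intro a k v0 v1
    simp only [List.zip_nil_right, List.foldl_nil, runLenB, goB, List.drop_nil, cnt]
    split_ifs <;> simp [Prod.ext_iff] <;> omega
  | cons b t ih =>
    intro a k v0 v1
    simp only [List.zip_cons_cons, List.foldl_cons]
    by_cases hab : a = b
    · subst hab
      have hs : stepA (k, v0, v1) (a, a) =
          (k + 1,
           if k + 1 ≥ 6 ∧ a = "O" then v0 + 1 else v0,
           if k + 1 ≥ 6 ∧ a = "R" then v1 + 1 else v1) := by
        simp only [stepA]
        split_ifs with h1 h2 <;> simp_all [Prod.ext_iff] <;> omega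
      rw [hs, ih]
      simp only [runLenB, if_pos rfl, List.drop_succ_cons]
      unfold cnt
      split_ifs <;> simp_all [Prod.ext_iff] <;> push_cast <;> omega
    · have hs : stepA (k, v0, v1) (a, b) = (0, v0, v1) := by
        simp only [stepA]
        rw [if_neg hab]
        split_ifs with h1 h2 <;> first | omega | rfl
      rw [hs, ih]
      simp only [runLenB, if_neg (fun h : b = a => hab h.symm), List.drop_zero]
      rw [goB_cons]
      have hc0 : cnt k 0 = 0 := by unfold cnt; omega
      simp only [Nat.cast_zero, hc0]
      split_ifs <;> simp [Prod.ext_iff] <;> omega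

-- ===== VERDICT (by name: the statement is the Claim_ definition above) =====
theorem count_6_streaks_spec : Claim_equal_count_6_streaks := by
  intro throws _
  unfold Spec_count_6_streaks count_6_streaks count_6_streaks_alt
  have hb := foldl_idx_pairs
    (f := fun (s : Int × Int × Int) (x y : String) =>
      let streak := if x = y then s.1 + 1 else 0
      if streak ≥ 6 ∧ x = "O" then (streak, s.2.1 + 1, s.2.2)
      else if streak ≥ 6 ∧ x = "R" then (streak, s.2.1, s.2.2 + 1)
      else (streak, s.2.1, s.2.2))
    throws "" throws.length 0 ((0 : Int), (0 : Int), (0 : Int)) (by omega)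
  simp only [Nat.cast_zero] at hb
  rw [hb]
  cases throws with
  | nil => simp [goB]
  | cons a t =>
    have hz : (a :: t).drop 0 = a :: t := rfl
    have hz1 : (a :: t).drop 1 = t := rfl
    rw [hz, hz1]
    have hm := main_inv t a 0 0 0
    have hstep : (fun (s : Int × Int × Int) (p : String × String) => stepA s p) = stepA := rfl
    rw [show ((a :: t).zip t).foldl (fun s p =>
        let streak := if p.1 = p.2 then s.1 + 1 else 0
        if streak ≥ 6 ∧ p.1 = "O" then (streak, s.2.1 + 1, s.2.2)
        else if streak ≥ 6 ∧ p.1 = "R" then (streak, s.2.1, s.2.2 + 1)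
        else (streak, s.2.1, s.2.2)) ((0:Int), (0:Int), (0:Int))
      = ((a :: t).zip t).foldl stepA ((0:Int), (0:Int), (0:Int)) from rfl]
    rw [goB_cons]
    simp only [hm]
    split_ifs <;> simp [Int.add_comm]
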